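-- pv_equiv track=rewrite | github.com/KarchinLab/MOCA | MOCA/PostProcess/R/Barplot.py | group_continuous_features
-- ===== SOURCE A (Python) =====
-- def group_continuous_features(Features):
--     '''
--     '''
--
--     GreaterThan = {}
--     for Feature in Features:
--         if ">=" in Feature:
--             Type, Threshold = Feature.replace(".>=", " ").split()
--             GreaterThan.setdefault(Type, []).append(Threshold)
--
--     LessThan = {}
--     for Feature in Features:
--         if "<" in Feature:
--             Type, Threshold = Feature.replace(".<", " ").split()
--             LessThan.setdefault(Type, []).append(Threshold)
--
--     Features = [Feature for Feature in Features if ">=" not in Feature and "<" not in Feature]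
--
--     for k, v in GreaterThan.items():
--         Features.extend([k + ".>=" + sorted(v)[0] for i in v])
--
--     for k, v in LessThan.items():
--         Features.extend([k + ".<" + sorted(v, reverse=True)[0] for i in v])
--
--     return Features
-- ===== SOURCE B (Python) =====
-- def group_continuous_features(Features):
--     # Different algorithm: instead of collecting every threshold per group and sorting the
--     # list for each emitted element, a single pass maintains per group only a running
--     # extremal threshold and a count; at the end each group emits its extremal string
--     # count times.  (Running min/max over strings equals sorted(v)[0] / sorted(v, reverse=True)[0].)
--     out = []
--     ge = {}   # type -> [running min threshold, count]
--     lt = {}   # type -> [running max threshold, count]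
--     for f in Features:
--         hit = False
--         if ">=" in f:
--             hit = True
--             t, thr = f.replace(".>=", " ").split()
--             e = ge.get(t)
--             if e is None:
--                 ge[t] = [thr, 1]
--             else:
--                 if thr < e[0]:
--                     e[0] = thr
--                 e[1] += 1
--         if "<" in f:
--             hit = True
--             t, thr = f.replace(".<", " ").split()
--             e = lt.get(t)
--             if e is None:
--                 lt[t] = [thr, 1]
--             else:
--                 if thr > e[0]:
--                     e[0] = thr
--                 e[1] += 1
--         if not hit:
--             out.append(f)
--     for k, (m, c) in ge.items():
--         out.extend([k + ".>=" + m] * c)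
--     for k, (m, c) in lt.items():
--         out.extend([k + ".<" + m] * c)
--     return out
-- ===== Notes on version B (the rewrite author's own statement) =====
-- stated objective: alternative
-- what changed: B never stores the per-group threshold lists A builds: one pass keeps only a running extremal threshold and a count per group, and each group then emits its extremal string count times, whereas A collects every threshold and re-sorts the whole group list once per emitted element.
import Mathlib
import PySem

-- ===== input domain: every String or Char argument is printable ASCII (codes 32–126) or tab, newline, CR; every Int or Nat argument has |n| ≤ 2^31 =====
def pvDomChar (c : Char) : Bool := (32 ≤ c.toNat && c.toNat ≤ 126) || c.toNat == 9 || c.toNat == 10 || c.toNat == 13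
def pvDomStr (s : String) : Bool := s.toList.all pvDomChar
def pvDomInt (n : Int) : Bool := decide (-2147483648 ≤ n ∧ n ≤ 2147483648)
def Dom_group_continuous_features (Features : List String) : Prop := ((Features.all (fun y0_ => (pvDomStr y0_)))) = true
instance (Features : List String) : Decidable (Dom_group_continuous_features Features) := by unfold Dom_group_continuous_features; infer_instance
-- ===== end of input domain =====

-- B replaces A's collect-all-thresholds-then-sort-per-element scheme by a single pass that
-- maintains only a running extremal threshold and a count per group (alternative algorithm).

-- ===== PORT A =====
-- shared parsing step: `Type, Threshold = f.replace(pat, " ").split(); d.setdefault(Type, []).append(Threshold)`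
def gcfAdd (pat : String) (d : PySem.Dict String (List String)) (f : String) :
    PySem.Dict String (List String) :=
  match PySem.Str.split₀ (PySem.Str.replace f pat " ") with
  | [t, thr] => d.modify t [] (fun v => v ++ [thr])
  | _ => d  -- Python raises ValueError here (tuple unpacking); such inputs are outside Pre_

def group_continuous_features (Features : List String) : List String :=
  let GreaterThan := Features.foldl
    (fun d f => if PySem.Str.isIn ">=" f then gcfAdd ".>=" d f else d) PySem.Dict.empty
  let LessThan := Features.foldl
    (fun d f => if PySem.Str.isIn "<" f then gcfAdd ".<" d f else d) PySem.Dict.empty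
  let Features2 := Features.filter (fun f => !(PySem.Str.isIn ">=" f) && !(PySem.Str.isIn "<" f))
  -- sorted(v)[0]: v is nonempty by construction, so `[0]` never raises; headD is exact there
  let Features3 := GreaterThan.items.foldl
    (fun acc kv => acc ++ kv.2.map (fun _ => kv.1 ++ ".>=" ++ (PySem.List.sorted kv.2 (fun x => x) false).headD "")) Features2
  LessThan.items.foldl
    (fun acc kv => acc ++ kv.2.map (fun _ => kv.1 ++ ".<" ++ (PySem.List.sorted kv.2 (fun x => x) true).headD "")) Features3

-- ===== PORT B =====
-- parse f and fold its threshold into the running (extremal, count) entry of its group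
-- (`e = d.get(t)`; `if e is None: d[t] = [thr, 1]` / `if cmp: e[0] = thr; e[1] += 1`)
def gcfUpd (cmp : String → String → Bool) (pat : String)
    (d : PySem.Dict String (String × Nat)) (f : String) : PySem.Dict String (String × Nat) :=
  match PySem.Str.split₀ (PySem.Str.replace f pat " ") with
  | [t, thr] =>
      match d.get? t with
      | none => d.insert t (thr, 1)
      | some e => d.insert t ((if cmp thr e.1 then thr else e.1), e.2 + 1)
  | _ => d

def group_continuous_features_alt (Features : List String) : List String :=
  let st := Features.foldl
    (fun st f =>
      let isGe := PySem.Str.isIn ">=" f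
      let isLt := PySem.Str.isIn "<" f
      ((if isGe then gcfUpd (fun a b => decide (a < b)) ".>=" st.1 f else st.1),
       (if isLt then gcfUpd (fun a b => decide (b < a)) ".<" st.2.1 f else st.2.1),
       (if !isGe && !isLt then st.2.2 ++ [f] else st.2.2)))
    ((PySem.Dict.empty : PySem.Dict String (String × Nat)),
     (PySem.Dict.empty : PySem.Dict String (String × Nat)), ([] : List String))
  let out := st.1.items.foldl
    (fun acc kv => acc ++ List.replicate kv.2.2 (kv.1 ++ ".>=" ++ kv.2.1)) st.2.2
  st.2.1.items.foldl
    (fun acc kv => acc ++ List.replicate kv.2.2 (kv.1 ++ ".<" ++ kv.2.1)) out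

-- ===== PRECONDITION & SPEC =====
-- Pre_ excludes exactly the inputs where Python A raises ValueError: a feature containing
-- ">=" (resp. "<") whose replace-then-split does not yield exactly two tokens.
def Pre_group_continuous_features (Features : List String) : Prop :=
  ∀ f ∈ Features,
    (PySem.Str.isIn ">=" f = true → (PySem.Str.split₀ (PySem.Str.replace f ".>=" " ")).length = 2) ∧
    (PySem.Str.isIn "<" f = true → (PySem.Str.split₀ (PySem.Str.replace f ".<" " ")).length = 2)
instance (Features : List String) : Decidable (Pre_group_continuous_features Features) := by
  unfold Pre_group_continuous_features; infer_instance

def pvWitness_group_continuous_features : List String :=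
  ["gene.>=5", "gene.>=3", "gene.<2", "plain", "gene.<7"]

def Spec_group_continuous_features (Features : List String) (out : List String) : Prop := out = group_continuous_features_alt Features
instance (Features : List String) (out : List String) : Decidable (Spec_group_continuous_features Features out) := by unfold Spec_group_continuous_features; infer_instance

-- ===== CLAIM (what is proved, stated in full; the proofs are below) =====
def Claim_equal_group_continuous_features : Prop := ∀ (Features : List String), Dom_group_continuous_features Features → Pre_group_continuous_features Features → Spec_group_continuous_features Features (group_continuous_features Features)

-- ===== LEMMAS AND PROOFS =====

-- abstraction of A's per-group threshold list down to B's (extremal, count) entry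
def gcfTr (F : List String → String × Nat) (d : PySem.Dict String (List String)) :
    PySem.Dict String (String × Nat) :=
  PySem.Dict.mk (d.items.map (fun p => (p.1, F p.2)))

def gcfMin (v : List String) : String × Nat :=
  (((PySem.List.min? v (fun x => x)).getD ""), v.length)
def gcfMax (v : List String) : String × Nat :=
  (((PySem.List.max? v (fun x => x)).getD ""), v.length)

theorem gcfTr_get? (F : List String → String × Nat) (d : PySem.Dict String (List String))
    (t : String) : (gcfTr F d).get? t = (d.get? t).map F := by
  simp only [gcfTr, PySem.Dict.get?, List.find?_map]
  rcases hf : List.find? (fun p => p.1 == t) d.items with _ | p <;>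
    simp [Function.comp_def, hf]

theorem gcfTr_contains (F : List String → String × Nat) (d : PySem.Dict String (List String))
    (k : String) : (gcfTr F d).contains k = d.contains k := by
  simp [gcfTr, PySem.Dict.contains, List.any_map, Function.comp_def]

theorem gcfTr_insert (F : List String → String × Nat) (d : PySem.Dict String (List String))
    (k : String) (w : List String) :
    gcfTr F (d.insert k w) = (gcfTr F d).insert k (F w) := by
  apply PySem.Dict.ext
  simp only [PySem.Dict.insert, gcfTr_contains]
  by_cases h : d.contains k = true <;>
    simp [gcfTr, h, List.map_map, Function.comp_def, apply_ite (fun p : String × List String => (p.1, F p.2))]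

theorem get?_mem_items (d : PySem.Dict String (List String)) (t : String) (v : List String)
    (h : d.get? t = some v) : (t, v) ∈ d.items := by
  simp only [PySem.Dict.get?] at h
  rcases hf : List.find? (fun p => p.1 == t) d.items with _ | p <;> rw [hf] at h <;> simp at h
  have hm := List.mem_of_find?_eq_some hf
  have hp := List.find?_some hf
  obtain ⟨p1, p2⟩ := p
  simp at hp h
  simp [hp, h] at hm ⊢
  exact hm

theorem min?_append_singleton (v : List String) (m x : String)
    (h : PySem.List.min? v (fun y => y) = some m) :
    PySem.List.min? (v ++ [x]) (fun y => y) = some (if x < m then x else m) := by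
  simp [PySem.List.min?] at *
  rw [h]
  split_ifs with h1 <;> simp_all

theorem max?_append_singleton (v : List String) (m x : String)
    (h : PySem.List.max? v (fun y => y) = some m) :
    PySem.List.max? (v ++ [x]) (fun y => y) = some (if m < x then x else m) := by
  simp [PySem.List.max?] at *
  rw [h]
  split_ifs with h1 <;> simp_all

theorem gcfMin_singleton (x : String) : gcfMin [x] = (x, 1) := by
  simp [gcfMin, PySem.List.min?]
theorem gcfMax_singleton (x : String) : gcfMax [x] = (x, 1) := by
  simp [gcfMax, PySem.List.max?]

theorem gcfMin_append (v : List String) (x : String) (hv : v ≠ []) :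
    gcfMin (v ++ [x]) = ((if decide (x < (gcfMin v).1) then x else (gcfMin v).1), (gcfMin v).2 + 1) := by
  rcases hm : PySem.List.min? v (fun y => y) with _ | m
  · exact absurd ((PySem.List.min?_eq_none_iff _ _).1 hm) hv
  simp [gcfMin, min?_append_singleton v m x hm, hm]
theorem gcfMax_append (v : List String) (x : String) (hv : v ≠ []) :
    gcfMax (v ++ [x]) = ((if decide ((gcfMax v).1 < x) then x else (gcfMax v).1), (gcfMax v).2 + 1) := by
  rcases hm : PySem.List.max? v (fun y => y) with _ | m
  · exact absurd ((PySem.List.max?_eq_none_iff _ _).1 hm) hv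
  simp [gcfMax, max?_append_singleton v m x hm, hm]

-- one step: B's running update is the abstraction of A's append-to-list update
theorem gcfUpd_tr (F : List String → String × Nat) (cmp : String → String → Bool) (pat f : String)
    (d : PySem.Dict String (List String)) (hne : ∀ p ∈ d.items, p.2 ≠ [])
    (hF1 : ∀ x, F [x] = (x, 1))
    (hF2 : ∀ v x, v ≠ [] → F (v ++ [x]) = ((if cmp x (F v).1 then x else (F v).1), (F v).2 + 1)) :
    gcfUpd cmp pat (gcfTr F d) f = gcfTr F (gcfAdd pat d f) := by
  unfold gcfUpd gcfAdd
  rcases hs : PySem.Str.split₀ (PySem.Str.replace f pat " ") with _ | ⟨t, _ | ⟨thr, _ | _⟩⟩ <;>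
    try rfl
  simp only [gcfTr_get?, PySem.Dict.modify]
  rcases hg : d.get? t with _ | v
  · simp [PySem.Dict.getD_eq_get?_getD, hg, gcfTr_insert, hF1]
  · have hvne : v ≠ [] := hne (t, v) (get?_mem_items d t v hg)
    simp [PySem.Dict.getD_eq_get?_getD, hg, gcfTr_insert, hF2 v thr hvne]

-- invariants of A's dict-building loops
theorem gcfAdd_vals_ne (pat : String) (d : PySem.Dict String (List String)) (f : String)
    (h : ∀ p ∈ d.items, p.2 ≠ []) : ∀ p ∈ (gcfAdd pat d f).items, p.2 ≠ [] := by
  unfold gcfAdd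
  split
  · intro p hp
    simp only [PySem.Dict.modify] at hp
    rcases (PySem.Dict.mem_items_insert _ _ _ _).1 hp with rfl | ⟨hp', _⟩
    · simp
    · exact h _ hp'
  · exact h

theorem foldl_gcf_vals_ne (cond pat : String) (fs : List String)
    (d : PySem.Dict String (List String)) (h : ∀ p ∈ d.items, p.2 ≠ []) :
    ∀ p ∈ (fs.foldl (fun d f => if PySem.Str.isIn cond f then gcfAdd pat d f else d) d).items,
      p.2 ≠ [] := by
  induction fs generalizing d with
  | nil => exact h
  | cons f fs ih =>
    simp only [List.foldl_cons]
    apply ih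
    split
    · exact gcfAdd_vals_ne pat d f h
    · exact h

-- B's single pass is the abstraction of A's two dict passes plus A's filter
theorem gcf_fuse_tr (fs : List String) (ge lt : PySem.Dict String (List String)) (pl : List String)
    (hne_ge : ∀ p ∈ ge.items, p.2 ≠ []) (hne_lt : ∀ p ∈ lt.items, p.2 ≠ []) :
    fs.foldl
      (fun st f =>
        let isGe := PySem.Str.isIn ">=" f
        let isLt := PySem.Str.isIn "<" f
        ((if isGe then gcfUpd (fun a b => decide (a < b)) ".>=" st.1 f else st.1),
         (if isLt then gcfUpd (fun a b => decide (b < a)) ".<" st.2.1 f else st.2.1),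
         (if !isGe && !isLt then st.2.2 ++ [f] else st.2.2)))
      (gcfTr gcfMin ge, gcfTr gcfMax lt, pl)
    = (gcfTr gcfMin (fs.foldl (fun d f => if PySem.Str.isIn ">=" f then gcfAdd ".>=" d f else d) ge),
       gcfTr gcfMax (fs.foldl (fun d f => if PySem.Str.isIn "<" f then gcfAdd ".<" d f else d) lt),
       pl ++ fs.filter (fun f => !(PySem.Str.isIn ">=" f) && !(PySem.Str.isIn "<" f))) := by
  induction fs generalizing ge lt pl with
  | nil => simp
  | cons f fs ih =>
    simp only [List.foldl_cons, List.filter_cons]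
    have hge := gcfUpd_tr gcfMin (fun a b => decide (a < b)) ".>=" f ge hne_ge
      gcfMin_singleton (fun v x hv => gcfMin_append v x hv)
    have hlt := gcfUpd_tr gcfMax (fun a b => decide (b < a)) ".<" f lt hne_lt
      gcfMax_singleton (fun v x hv => gcfMax_append v x hv)
    cases h1 : PySem.Str.isIn ">=" f <;> cases h2 : PySem.Str.isIn "<" f <;>
      simp only [h1, h2, Bool.not_false, Bool.not_true, Bool.true_and, Bool.false_and,
        Bool.and_self, Bool.false_eq_true, if_true, if_false, ite_true, ite_false]
    · simpa only [List.append_assoc, List.singleton_append] using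
        ih ge lt (pl ++ [f]) hne_ge hne_lt
    · rw [hlt]
      exact ih ge (gcfAdd ".<" lt f) pl hne_ge (gcfAdd_vals_ne ".<" lt f hne_lt)
    · rw [hge]
      exact ih (gcfAdd ".>=" ge f) lt pl (gcfAdd_vals_ne ".>=" ge f hne_ge) hne_lt
    · rw [hge, hlt]
      exact ih (gcfAdd ".>=" ge f) (gcfAdd ".<" lt f) pl
        (gcfAdd_vals_ne ".>=" ge f hne_ge) (gcfAdd_vals_ne ".<" lt f hne_lt)


-- sorted(v)[0] = min(v) and sorted(v, reverse=True)[0] = max(v) on nonempty string lists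
theorem sorted_head_eq_min (v : List String) (hv : v ≠ []) :
    (PySem.List.sorted v (fun x => x) false).headD ""
      = (PySem.List.min? v (fun x => x)).getD "" := by
  rcases hm : PySem.List.min? v (fun x => x) with _ | m
  · exact absurd ((PySem.List.min?_eq_none_iff _ _).1 hm) hv
  rcases hs : PySem.List.sorted v (fun x => x) false with _ | ⟨a, t⟩
  · exact absurd ((PySem.List.sorted_eq_nil_iff _ _ _).1 hs) hv
  have ha : a ∈ v := (PySem.List.mem_sorted _ _ _ _).1 (by rw [hs]; exact List.mem_cons_self)
  have h1 : m ≤ a := PySem.List.min?_isMin hm a ha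
  have h2 : a ≤ m := PySem.List.key_head_sorted_le v (fun x => x) hs m (PySem.List.min?_mem hm)
  simp [le_antisymm h2 h1]

theorem sorted_rev_head_eq_max (v : List String) (hv : v ≠ []) :
    (PySem.List.sorted v (fun x => x) true).headD ""
      = (PySem.List.max? v (fun x => x)).getD "" := by
  rcases hm : PySem.List.max? v (fun x => x) with _ | m
  · exact absurd ((PySem.List.max?_eq_none_iff _ _).1 hm) hv
  rcases hs : PySem.List.sorted v (fun x => x) true with _ | ⟨a, t⟩
  · exact absurd ((PySem.List.sorted_eq_nil_iff _ _ _).1 hs) hv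
  have ha : a ∈ v := (PySem.List.mem_sorted _ _ _ _).1 (by rw [hs]; exact List.mem_cons_self)
  have h1 : a ≤ m := PySem.List.max?_isMax hm a ha
  have h2 : m ≤ a := PySem.List.key_head_sorted_rev_ge v (fun x => x) hs m (PySem.List.max?_mem hm)
  simp [le_antisymm h2 h1]

-- ===== VERDICT (by name: the statement is the Claim_ definition above) =====
theorem group_continuous_features_spec : Claim_equal_group_continuous_features := by
  intro Features _ _
  unfold Spec_group_continuous_features group_continuous_features group_continuous_features_alt
  have hempty : ∀ p ∈ (PySem.Dict.empty : PySem.Dict String (List String)).items, p.2 ≠ [] := by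
    intro p hp; simp [PySem.Dict.empty] at hp
  have hstart : ((PySem.Dict.empty : PySem.Dict String (String × Nat)),
      (PySem.Dict.empty : PySem.Dict String (String × Nat)), ([] : List String))
      = (gcfTr gcfMin PySem.Dict.empty, gcfTr gcfMax PySem.Dict.empty, ([] : List String)) := rfl
  rw [hstart, gcf_fuse_tr Features PySem.Dict.empty PySem.Dict.empty [] hempty hempty]
  simp only [List.nil_append]
  have hGT := foldl_gcf_vals_ne ">=" ".>=" Features PySem.Dict.empty hempty
  have hLT := foldl_gcf_vals_ne "<" ".<" Features PySem.Dict.empty hempty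
  have hitems : ∀ (F : List String → String × Nat) (d : PySem.Dict String (List String)),
      (gcfTr F d).items = d.items.map (fun p => (p.1, F p.2)) := fun _ _ => rfl
  rw [hitems, hitems, List.foldl_map, List.foldl_map]
  have h1 := PySem.List.foldl_congr_mem
      (Features.foldl (fun d f => if PySem.Str.isIn ">=" f then gcfAdd ".>=" d f else d) PySem.Dict.empty).items
      (fun acc kv => acc ++ kv.2.map (fun _ => kv.1 ++ ".>=" ++ (PySem.List.sorted kv.2 (fun x => x) false).headD ""))
      (fun (acc : List String) (kv : String × List String) =>
        acc ++ List.replicate (kv.1, gcfMin kv.2).2.2 ((kv.1, gcfMin kv.2).1 ++ ".>=" ++ (kv.1, gcfMin kv.2).2.1))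
      (Features.filter (fun f => !(PySem.Str.isIn ">=" f) && !(PySem.Str.isIn "<" f)))
      (by intro acc kv hkv
          beta_reduce
          rw [sorted_head_eq_min kv.2 (hGT kv hkv)]
          simp [gcfMin, List.map_const'])
  rw [h1]
  exact PySem.List.foldl_congr_mem _ _ _ _
      (by intro acc kv hkv
          rw [sorted_rev_head_eq_max kv.2 (hLT kv hkv)]
          simp [gcfMax, List.map_const'])
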